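-- pv_equiv track=rewrite | github.com/derekpappas/fpl | cslc-java/scripts/port_trunk_parser_g_to_g4.py | strip_antlr2_syntactic_predicates
-- ===== SOURCE A (Python) =====
-- def strip_antlr2_syntactic_predicates(text: str) -> str:
--     r"""
--     Turn ``( ( X ) => rest`` into ``( rest`` by removing the inner ``( X ) =>`` when it follows ``(``.
--     Handles common ANTLR2 disambiguation pattern from verilog.parser.g.
--     """
--     s = text
--     out_parts: list[str] = []
--     i = 0
--     n = len(s)
--     while i < n:
--         if i + 1 < n and s[i] == "(" and s[i + 1] == "(":
--             inner_open = i + 1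
--             depth = 1
--             j = inner_open + 1
--             while j < n and depth > 0:
--                 if s[j] == "(":
--                     depth += 1
--                 elif s[j] == ")":
--                     depth -= 1
--                 j += 1
--             if depth != 0:
--                 out_parts.append(s[i])
--                 i += 1
--                 continue
--             inner_close = j - 1
--             k = inner_close + 1
--             while k < n and s[k] in " \t\r\n":
--                 k += 1
--             if s.startswith("=>", k):
--                 k += 2
--                 while k < n and s[k] in " \t\r\n":
--                     k += 1
--                 out_parts.append(s[i])
--                 i = k
--                 continue
--         out_parts.append(s[i])
--         i += 1
--     return "".join(out_parts)
-- ===== SOURCE B (Python) =====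
-- def _skip_ws(s: str, k: int) -> int:
--     n = len(s)
--     while k < n and s[k] in " \t\r\n":
--         k += 1
--     return k
--
--
-- def strip_antlr2_syntactic_predicates(text: str) -> str:
--     # One pass with a stack precomputes the matching-paren table, so each
--     # "((" needs only an O(1) lookup instead of a rescan to the closing paren.
--     s = text
--     n = len(s)
--     match: list = [None] * n
--     stack: list = []
--     for idx, ch in enumerate(s):
--         if ch == "(":
--             stack.append(idx)
--         elif ch == ")":
--             if stack:
--                 match[stack.pop()] = idx
--     out_parts: list = []
--     i = 0
--     while i < n:
--         ch = s[i]
--         if ch == "(" and i + 1 < n and s[i + 1] == "(" and match[i + 1] is not None: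
--             k = _skip_ws(s, match[i + 1] + 1)
--             if k + 1 < n and s[k] == "=" and s[k + 1] == ">":
--                 k = _skip_ws(s, k + 2)
--                 out_parts.append("(")
--                 i = k
--                 continue
--         out_parts.append(ch)
--         i += 1
--     return "".join(out_parts)
-- ===== Notes on version B (the rewrite author's own statement) =====
-- stated objective: alternative
-- what changed: B precomputes the matching-parenthesis table in one stack pass and the output pass looks each candidate's closing paren up in that table, instead of A's depth rescan from every candidate position.
import Mathlib
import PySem

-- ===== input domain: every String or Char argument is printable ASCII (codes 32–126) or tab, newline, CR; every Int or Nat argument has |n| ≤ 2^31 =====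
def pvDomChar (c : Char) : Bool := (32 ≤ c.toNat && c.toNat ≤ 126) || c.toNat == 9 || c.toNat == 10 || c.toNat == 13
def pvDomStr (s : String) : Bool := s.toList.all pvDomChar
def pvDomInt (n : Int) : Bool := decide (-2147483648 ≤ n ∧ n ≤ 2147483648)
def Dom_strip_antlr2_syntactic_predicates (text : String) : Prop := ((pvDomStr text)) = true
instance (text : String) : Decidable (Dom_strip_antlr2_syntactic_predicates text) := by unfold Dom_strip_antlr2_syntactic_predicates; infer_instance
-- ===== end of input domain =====

-- B builds the matching-paren table once with a stack and looks matches up in it,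
-- instead of A's per-occurrence depth rescan (alternative algorithm; same measured cost).

-- shared char test for membership in the literal " \t\r\n"
def pvIsWs (c : Char) : Bool := c = ' ' || c = '\t' || c = '\r' || c = '\n'

-- ===== PORT A =====
-- inner `while j < n and depth > 0` loop; returns the final (j, depth)
def aDepthLoop (s : List Char) (j : Nat) (depth : Nat) : Nat × Nat :=
  if h : j < s.length ∧ 0 < depth then
    aDepthLoop s (j + 1)
      (if s[j]! = '(' then depth + 1 else if s[j]! = ')' then depth - 1 else depth)
  else (j, depth)
termination_by s.length - j
decreasing_by exact Nat.sub_succ_lt_self _ _ h.1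

-- `while k < n and s[k] in " \t\r\n"` loop
def aSkipWs (s : List Char) (k : Nat) : Nat :=
  if h : k < s.length ∧ pvIsWs s[k]! then aSkipWs s (k + 1) else k
termination_by s.length - k
decreasing_by exact Nat.sub_succ_lt_self _ _ h.1

-- termination facts for the main loop (cited by `decreasing_by` below)
lemma aDepthLoop_ge (s : List Char) (j d : Nat) : j ≤ (aDepthLoop s j d).1 := by
  fun_induction aDepthLoop with
  | case1 j d h ih => exact Nat.le_of_succ_le ih
  | case2 j d h => exact Nat.le_refl _

lemma aSkipWs_ge (s : List Char) (k : Nat) : k ≤ aSkipWs s k := by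
  fun_induction aSkipWs with
  | case1 k h ih => exact Nat.le_of_succ_le ih
  | case2 k h => exact Nat.le_refl _

-- A's main `while i < n` loop, accumulating out_parts
def aMain (s : List Char) (i : Nat) (acc : List Char) : List Char :=
  if hi : i < s.length then
    if hb : i + 1 < s.length ∧ s[i]! = '(' ∧ s[i + 1]! = '(' then
      let p := aDepthLoop s (i + 2) 1
      if p.2 ≠ 0 then
        aMain s (i + 1) (acc ++ [s[i]!])
      else
        -- inner_close = p.1 - 1; k starts at inner_close + 1 = p.1
        let k := aSkipWs s p.1
        -- s.startswith("=>", k)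
        if k + 1 < s.length ∧ s[k]! = '=' ∧ s[k + 1]! = '>' then
          aMain s (aSkipWs s (k + 2)) (acc ++ [s[i]!])
        else
          aMain s (i + 1) (acc ++ [s[i]!])
    else
      aMain s (i + 1) (acc ++ [s[i]!])
  else acc
termination_by s.length - i
decreasing_by
  · exact Nat.sub_succ_lt_self _ _ hi
  · refine Nat.sub_lt_sub_left hi ?_
    have h1 := aDepthLoop_ge s (i + 2) 1
    have h2 := aSkipWs_ge s (aDepthLoop s (i + 2) 1).1
    have h3 := aSkipWs_ge s (aSkipWs s (aDepthLoop s (i + 2) 1).1 + 2)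
    exact Nat.lt_of_lt_of_le (Nat.lt_of_lt_of_le
      (Nat.lt_of_lt_of_le (Nat.lt_succ_of_lt (Nat.lt_succ_self i)) h1)
      (Nat.le_trans h2 (Nat.le_add_right _ 2))) h3
  · exact Nat.sub_succ_lt_self _ _ hi
  · exact Nat.sub_succ_lt_self _ _ hi

def strip_antlr2_syntactic_predicates (text : String) : String :=
  String.mk (aMain text.toList 0 [])

-- ===== PORT B =====
-- B's helper _skip_ws (the short-circuit `and` of the while condition as nested ifs)
def bSkipWs (s : List Char) (k : Nat) : Nat :=
  if h : k < s.length then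
    if pvIsWs s[k]! then bSkipWs s (k + 1) else k
  else k
termination_by s.length - k
decreasing_by exact Nat.sub_succ_lt_self _ _ h

lemma bSkipWs_ge (s : List Char) (k : Nat) : k ≤ bSkipWs s k := by
  fun_induction bSkipWs with
  | case1 k h hw ih => exact Nat.le_of_succ_le ih
  | case2 k h hw => exact Nat.le_refl _
  | case3 k h => exact Nat.le_refl _

-- the `for idx, ch in enumerate(s)` pass building the matching-paren table
def bBuild (s : List Char) (t : Nat) (m : List (Option Nat)) (stk : List Nat) :
    List (Option Nat) :=
  if h : t < s.length then
    if s[t]! = '(' then bBuild s (t + 1) m (t :: stk)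
    else if s[t]! = ')' then
      match stk with
      | [] => bBuild s (t + 1) m []
      | q :: rest => bBuild s (t + 1) (m.set q (some t)) rest
    else bBuild s (t + 1) m stk
  else m
termination_by s.length - t
decreasing_by all_goals exact Nat.sub_succ_lt_self _ _ h

def bMatchTable (s : List Char) : List (Option Nat) :=
  bBuild s 0 (List.replicate s.length none) []

-- B's main `while i < n` loop.  The conjunct `i + 1 < …` is only a termination
-- guard: bMatchTable entries always exceed their key, so it never changes the result.
def bMain (s : List Char) (m : List (Option Nat)) (i : Nat) (acc : List Char) :
    List Char :=
  if hi : i < s.length then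
    if hb : s[i]! = '(' ∧ i + 1 < s.length ∧ s[i + 1]! = '(' ∧
        (m.getD (i + 1) none).isSome ∧ i + 1 < (m.getD (i + 1) none).getD 0 then
      let k := bSkipWs s ((m.getD (i + 1) none).getD 0 + 1)
      if k + 1 < s.length ∧ s[k]! = '=' ∧ s[k + 1]! = '>' then
        bMain s m (bSkipWs s (k + 2)) (acc ++ ['('])
      else
        bMain s m (i + 1) (acc ++ [s[i]!])
    else
      bMain s m (i + 1) (acc ++ [s[i]!])
  else acc
termination_by s.length - i
decreasing_by
  · refine Nat.sub_lt_sub_left hi ?_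
    have h5 := hb.2.2.2.2
    have h2 := bSkipWs_ge s ((m.getD (i + 1) none).getD 0 + 1)
    have h3 := bSkipWs_ge s (bSkipWs s ((m.getD (i + 1) none).getD 0 + 1) + 2)
    exact Nat.lt_of_lt_of_le (Nat.lt_of_lt_of_le
      (Nat.lt_succ_of_lt (Nat.lt_of_succ_lt h5)) h2)
      (Nat.le_trans (Nat.le_add_right _ 2) h3)
  · exact Nat.sub_succ_lt_self _ _ hi
  · exact Nat.sub_succ_lt_self _ _ hi

def strip_antlr2_syntactic_predicates_alt (text : String) : String :=
  String.mk (bMain text.toList (bMatchTable text.toList) 0 [])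

-- ===== PRECONDITION & SPEC =====
def Spec_strip_antlr2_syntactic_predicates (text : String) (out : String) : Prop := out = strip_antlr2_syntactic_predicates_alt text
instance (text : String) (out : String) : Decidable (Spec_strip_antlr2_syntactic_predicates text out) := by unfold Spec_strip_antlr2_syntactic_predicates; infer_instance

-- ===== CLAIM (what is proved, stated in full; the proofs are below) =====
def Claim_equal_strip_antlr2_syntactic_predicates : Prop := ∀ (text : String), Dom_strip_antlr2_syntactic_predicates text → Spec_strip_antlr2_syntactic_predicates text (strip_antlr2_syntactic_predicates text)

-- ===== LEMMAS AND PROOFS =====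

-- δ of a char for paren depth
def pvDelta (c : Char) : Int := if c = '(' then 1 else if c = ')' then -1 else 0

-- cumulated δ over the first t chars
def pvCum (s : List Char) (t : Nat) : Int := ((s.take t).map pvDelta).sum

-- depth after processing s[q+1..t), having started at q+1 with depth 1
def pvF (s : List Char) (q t : Nat) : Int := 1 + pvCum s t - pvCum s (q + 1)

-- first r in [r0, t) with pvF s q (r+1) = 0 (spec of "matching close of the '(' at q")
def mcb (s : List Char) (q r0 t : Nat) : Option Nat :=
  if h : r0 < t then
    if pvF s q (r0 + 1) = 0 then some r0 else mcb s q (r0 + 1) t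
  else none
termination_by t - r0
decreasing_by exact Nat.sub_succ_lt_self _ _ h

lemma pvCum_succ (s : List Char) (t : Nat) (h : t < s.length) :
    pvCum s (t + 1) = pvCum s t + pvDelta s[t]! := by
  have hts : s.take (t + 1) = s.take t ++ [s[t]] := by
    rw [List.take_succ, List.getElem?_eq_getElem h]; rfl
  unfold pvCum
  rw [getElem!_pos s t h, hts, List.map_append, List.sum_append]
  simp

lemma pvF_self (s : List Char) (q : Nat) : pvF s q (q + 1) = 1 := by
  unfold pvF; ring

lemma pvF_step (s : List Char) (q t : Nat) (ht : t < s.length) :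
    pvF s q (t + 1) = pvF s q t + pvDelta s[t]! := by
  unfold pvF; rw [pvCum_succ s t ht]; ring

lemma skip_eq_aux (s : List Char) :
    ∀ N k, s.length - k ≤ N → aSkipWs s k = bSkipWs s k := by
  intro N
  induction N with
  | zero =>
      intro k h
      rw [aSkipWs, bSkipWs, dif_neg (by omega), dif_neg (by omega)]
  | succ N ih =>
      intro k h
      by_cases hk : k < s.length
      · by_cases hw : pvIsWs s[k]!
        · rw [aSkipWs, bSkipWs, dif_pos ⟨hk, hw⟩, dif_pos hk, if_pos hw]
          exact ih (k + 1) (by omega)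
        · rw [aSkipWs, bSkipWs, dif_neg (fun hc => hw hc.2), dif_pos hk, if_neg hw]
      · rw [aSkipWs, bSkipWs, dif_neg (fun hc => hk hc.1), dif_neg hk]

lemma skip_eq (s : List Char) (k : Nat) : aSkipWs s k = bSkipWs s k :=
  skip_eq_aux s (s.length - k) k le_rfl

-- mcb basic facts
lemma mcb_none_big (s : List Char) (q r0 t : Nat) (h : t ≤ r0) : mcb s q r0 t = none := by
  rw [mcb, dif_neg (by omega)]

lemma mcb_some_bounds_aux (s : List Char) (q t : Nat) :
    ∀ n r0 r, t - r0 ≤ n → mcb s q r0 t = some r → r0 ≤ r ∧ r < t := by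
  intro n
  induction n with
  | zero => intro r0 r hle h; rw [mcb, dif_neg (by omega)] at h; cases h
  | succ n ih =>
      intro r0 r hle h
      by_cases hlt : r0 < t
      · rw [mcb, dif_pos hlt] at h
        by_cases hz : pvF s q (r0 + 1) = 0
        · rw [if_pos hz] at h; injection h with h; omega
        · rw [if_neg hz] at h
          have := ih (r0 + 1) r (by omega) h
          omega
      · rw [mcb, dif_neg hlt] at h; cases h

lemma mcb_some_bounds (s : List Char) (q r0 t r : Nat) (h : mcb s q r0 t = some r) :
    r0 ≤ r ∧ r < t :=
  mcb_some_bounds_aux s q t (t - r0) r0 r le_rfl h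

lemma mcb_mono_some_aux (s : List Char) (q t : Nat) :
    ∀ n r0 r, t - r0 ≤ n → mcb s q r0 t = some r → mcb s q r0 (t + 1) = some r := by
  intro n
  induction n with
  | zero => intro r0 r hle h; rw [mcb, dif_neg (by omega)] at h; cases h
  | succ n ih =>
      intro r0 r hle h
      by_cases hlt : r0 < t
      · rw [mcb, dif_pos hlt] at h
        rw [mcb, dif_pos (by omega)]
        by_cases hz : pvF s q (r0 + 1) = 0
        · rw [if_pos hz] at h ⊢; exact h
        · rw [if_neg hz] at h ⊢; exact ih (r0 + 1) r (by omega) h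
      · rw [mcb, dif_neg hlt] at h; cases h

lemma mcb_mono_some (s : List Char) (q r0 t r : Nat) (h : mcb s q r0 t = some r) :
    mcb s q r0 (t + 1) = some r :=
  mcb_mono_some_aux s q t (t - r0) r0 r le_rfl h

lemma mcb_none_step_aux (s : List Char) (q t : Nat) :
    ∀ n r0, t - r0 ≤ n → mcb s q r0 t = none → r0 ≤ t →
      mcb s q r0 (t + 1) = if pvF s q (t + 1) = 0 then some t else none := by
  intro n
  induction n with
  | zero =>
      intro r0 hle h hr
      have : r0 = t := by omega
      subst this
      rw [mcb, dif_pos (by omega)]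
      by_cases hz : pvF s q (r0 + 1) = 0
      · rw [if_pos hz, if_pos hz]
      · rw [if_neg hz, if_neg hz]
        exact mcb_none_big s q (r0 + 1) (r0 + 1) le_rfl
  | succ n ih =>
      intro r0 hle h hr
      by_cases hlt : r0 < t
      · rw [mcb, dif_pos hlt] at h
        by_cases hz : pvF s q (r0 + 1) = 0
        · rw [if_pos hz] at h; cases h
        · rw [if_neg hz] at h
          rw [mcb, dif_pos (by omega), if_neg hz]
          exact ih (r0 + 1) (by omega) h (by omega)
      · have : r0 = t := by omega
        subst this
        rw [mcb, dif_pos (by omega)]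
        by_cases hz : pvF s q (r0 + 1) = 0
        · rw [if_pos hz, if_pos hz]
        · rw [if_neg hz, if_neg hz]
          exact mcb_none_big s q (r0 + 1) (r0 + 1) le_rfl

lemma mcb_none_step (s : List Char) (q r0 t : Nat) (h : mcb s q r0 t = none) (hr : r0 ≤ t) :
    mcb s q r0 (t + 1) = if pvF s q (t + 1) = 0 then some t else none :=
  mcb_none_step_aux s q t (t - r0) r0 le_rfl h hr

lemma mcb_none_of_aux (s : List Char) (q t : Nat) :
    ∀ n r0, t - r0 ≤ n → (∀ r, r0 ≤ r → r < t → pvF s q (r + 1) ≠ 0) →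
      mcb s q r0 t = none := by
  intro n
  induction n with
  | zero => intro r0 hle _; exact mcb_none_big s q r0 t (by omega)
  | succ n ih =>
      intro r0 hle h
      by_cases hlt : r0 < t
      · rw [mcb, dif_pos hlt, if_neg (h r0 le_rfl hlt)]
        exact ih (r0 + 1) (by omega) (fun r h1 h2 => h r (by omega) h2)
      · exact mcb_none_big s q r0 t (by omega)

lemma mcb_none_of (s : List Char) (q r0 t : Nat)
    (h : ∀ r, r0 ≤ r → r < t → pvF s q (r + 1) ≠ 0) : mcb s q r0 t = none :=
  mcb_none_of_aux s q t (t - r0) r0 le_rfl h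

lemma mcb_stable_none (s : List Char) (q t : Nat) (h : mcb s q (q + 1) t = none)
    (h2 : q + 1 ≤ t) (h3 : pvF s q (t + 1) ≠ 0) : mcb s q (q + 1) (t + 1) = none := by
  rw [mcb_none_step s q (q + 1) t h h2, if_neg h3]

lemma getD_eq (m : List (Option Nat)) (q : Nat) : m.getD q none = (m[q]?).getD none := by
  simp [List.getD]

-- the one-step depth update of A's inner scan, as an Int equation
lemma dstep_int (s : List Char) (q j : Nat) (d : Nat) (hd : 0 < d) (hjn : j < s.length)
    (hF : (d : Int) = pvF s q j) :
    ((if s[j]! = '(' then d + 1 else if s[j]! = ')' then d - 1 else d : Nat) : Int) =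
      pvF s q (j + 1) := by
  rw [pvF_step s q j hjn, ← hF]
  unfold pvDelta
  by_cases h1 : s[j]! = '('
  · rw [if_pos h1, if_pos h1]; push_cast; ring
  · rw [if_neg h1, if_neg h1]
    by_cases h2 : s[j]! = ')'
    · rw [if_pos h2, if_pos h2]; omega
    · rw [if_neg h2, if_neg h2]; push_cast; ring

-- A's depth scan agrees with mcb (matched case)
lemma dscan_some_aux (s : List Char) (q : Nat) :
    ∀ (N j d r : Nat), s.length - j ≤ N → q < j → 0 < d → (d : Int) = pvF s q j →
      mcb s q j s.length = some r → aDepthLoop s j d = (r + 1, 0) := by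
  intro N
  induction N with
  | zero =>
      intro j d r hle hj hd hF hm
      rw [mcb_none_big s q j s.length (by omega)] at hm; cases hm
  | succ N ih =>
      intro j d r hle hj hd hF hm
      by_cases hjn : j < s.length
      · rw [mcb, dif_pos hjn] at hm
        rw [aDepthLoop, dif_pos ⟨hjn, hd⟩]
        have hF' := dstep_int s q j d hd hjn hF
        by_cases hz : pvF s q (j + 1) = 0
        · rw [if_pos hz] at hm
          injection hm with hm
          subst hm
          have : (if s[j]! = '(' then d + 1 else if s[j]! = ')' then d - 1 else d) = 0 := by
            omega
          rw [this, aDepthLoop, dif_neg (by omega)]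
        · rw [if_neg hz] at hm
          have hd' : 0 < (if s[j]! = '(' then d + 1 else if s[j]! = ')' then d - 1 else d) := by
            rcases Nat.eq_zero_or_pos (if s[j]! = '(' then d + 1 else if s[j]! = ')' then d - 1 else d) with h0 | h0
            · rw [h0] at hF'; simp at hF'; exact absurd hF'.symm hz
            · exact h0
          exact ih (j + 1) _ r (by omega) (by omega) hd' hF' hm
      · rw [mcb_none_big s q j s.length (by omega)] at hm; cases hm

lemma dscan_some (s : List Char) (q j d r : Nat) (hj : q < j) (hd : 0 < d)
    (hF : (d : Int) = pvF s q j) (hm : mcb s q j s.length = some r) :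
    aDepthLoop s j d = (r + 1, 0) :=
  dscan_some_aux s q (s.length - j) j d r le_rfl hj hd hF hm

-- A's depth scan agrees with mcb (unmatched case)
lemma dscan_none_aux (s : List Char) (q : Nat) :
    ∀ (N j d : Nat), s.length - j ≤ N → q < j → 0 < d → (d : Int) = pvF s q j →
      mcb s q j s.length = none → (aDepthLoop s j d).2 ≠ 0 := by
  intro N
  induction N with
  | zero =>
      intro j d hle hj hd hF hm
      rw [aDepthLoop, dif_neg (by omega)]
      omega
  | succ N ih =>
      intro j d hle hj hd hF hm
      by_cases hjn : j < s.length
      · rw [mcb, dif_pos hjn] at hm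
        rw [aDepthLoop, dif_pos ⟨hjn, hd⟩]
        have hF' := dstep_int s q j d hd hjn hF
        by_cases hz : pvF s q (j + 1) = 0
        · rw [if_pos hz] at hm; cases hm
        · rw [if_neg hz] at hm
          have hd' : 0 < (if s[j]! = '(' then d + 1 else if s[j]! = ')' then d - 1 else d) := by
            rcases Nat.eq_zero_or_pos (if s[j]! = '(' then d + 1 else if s[j]! = ')' then d - 1 else d) with h0 | h0
            · rw [h0] at hF'; simp at hF'; exact absurd hF'.symm hz
            · exact h0
          exact ih (j + 1) _ (by omega) (by omega) hd' hF' hm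
      · rw [aDepthLoop, dif_neg (by omega)]
        omega

lemma dscan_none (s : List Char) (q j d : Nat) (hj : q < j) (hd : 0 < d)
    (hF : (d : Int) = pvF s q j) (hm : mcb s q j s.length = none) :
    (aDepthLoop s j d).2 ≠ 0 :=
  dscan_none_aux s q (s.length - j) j d le_rfl hj hd hF hm

-- stack invariant: elements are unmatched-so-far '(' positions, depths = levels
def StkInv (s : List Char) (t : Nat) : List Nat → Nat → Prop
  | [], _ => True
  | q :: rest, lvl =>
      s[q]! = '(' ∧ q < t ∧ pvF s q t = lvl ∧
      (∀ u, q < u → u ≤ t → 1 ≤ pvF s q u) ∧ StkInv s t rest (lvl + 1)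

def MInv (s : List Char) (t : Nat) (m : List (Option Nat)) : Prop :=
  m.length = s.length ∧
  ∀ q, q < s.length → m.getD q none = (if s[q]! = '(' then mcb s q (q + 1) t else none)

def Complete (s : List Char) (t : Nat) (stk : List Nat) : Prop :=
  ∀ q, q < t → s[q]! = '(' → q ∈ stk ∨ (mcb s q (q + 1) t).isSome

lemma StkInv_mono (s : List Char) (t : Nat) (ht : t < s.length) :
    ∀ (stk : List Nat) (lvl lvl' : Nat), (lvl' : Int) = lvl + pvDelta s[t]! → 1 ≤ lvl' →
      StkInv s t stk lvl → StkInv s (t + 1) stk lvl' := by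
  intro stk
  induction stk with
  | nil => intro _ _ _ _ _; trivial
  | cons q rest ih =>
      intro lvl lvl' hrel hpos h
      obtain ⟨h1, h2, h3, h4, h5⟩ := h
      have hstep : pvF s q (t + 1) = pvF s q t + pvDelta s[t]! := by
        unfold pvF; rw [pvCum_succ s t ht]; ring
      refine ⟨h1, by omega, by rw [hstep, h3]; omega, ?_, ?_⟩
      · intro u hu1 hu2
        rcases Nat.lt_or_ge u (t + 1) with h | h
        · exact h4 u hu1 (by omega)
        · have : u = t + 1 := by omega
          rw [this, hstep, h3]; omega
      · exact ih (lvl + 1) (lvl' + 1) (by push_cast; omega) (by omega) h5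

lemma StkInv_mem (s : List Char) (t : Nat) :
    ∀ (stk : List Nat) (lvl : Nat) (q : Nat), StkInv s t stk lvl → q ∈ stk →
      ∃ l, lvl ≤ l ∧ pvF s q t = l ∧ q < t ∧ (∀ u, q < u → u ≤ t → 1 ≤ pvF s q u) := by
  intro stk
  induction stk with
  | nil => intro _ _ _ h; cases h
  | cons a rest ih =>
      intro lvl q h hq
      obtain ⟨h1, h2, h3, h4, h5⟩ := h
      rcases List.mem_cons.mp hq with h | h
      · subst h; exact ⟨lvl, le_rfl, h3, h2, h4⟩
      · obtain ⟨l, hl1, hl2⟩ := ih (lvl + 1) q h5 h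
        exact ⟨l, by omega, hl2⟩






-- one MInv-preservation step shared by all four transition cases: the table is
-- unchanged and every live '(' keeps a nonzero running depth
lemma MInv_keep (s : List Char) (t : Nat) (ht : t < s.length) (m : List (Option Nat))
    (stk : List Nat) (hM : MInv s t m) (hC : Complete s t stk) (hS : StkInv s t stk 1)
    (hchar : s[t]! ≠ '(')
    (hstk : ∀ q ∈ stk, pvF s q (t + 1) ≠ 0) : MInv s (t + 1) m := by
  obtain ⟨hlen, hq⟩ := hM
  refine ⟨hlen, fun q hq' => ?_⟩
  rw [hq q hq']
  by_cases hc : s[q]! = '('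
  · rw [if_pos hc, if_pos hc]
    cases hmc : mcb s q (q + 1) t with
    | some r => exact (mcb_mono_some s q (q + 1) t r hmc).symm
    | none =>
        rcases Nat.lt_or_ge q t with hlt | hge
        · rcases hC q hlt hc with hin | hsome
          · exact (mcb_stable_none s q t hmc (by omega) (hstk q hin)).symm
          · rw [hmc] at hsome; simp at hsome
        · have : q = t ∨ t < q := by omega
          rcases this with h | h
          · subst h; exact absurd hc hchar
          · rw [mcb_none_big s q (q + 1) (t + 1) (by omega)]
  · rw [if_neg hc, if_neg hc]

-- MInv-preservation when s[t]! = '(' (push step: table unchanged)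
lemma MInv_push (s : List Char) (t : Nat) (ht : t < s.length) (m : List (Option Nat))
    (stk : List Nat) (hM : MInv s t m) (hC : Complete s t stk) (hS : StkInv s t stk 1)
    (hchar : s[t]! = '(')
    (hstk : ∀ q ∈ stk, pvF s q (t + 1) ≠ 0) : MInv s (t + 1) m := by
  obtain ⟨hlen, hq⟩ := hM
  refine ⟨hlen, fun q hq' => ?_⟩
  rw [hq q hq']
  by_cases hc : s[q]! = '('
  · rw [if_pos hc, if_pos hc]
    cases hmc : mcb s q (q + 1) t with
    | some r => exact (mcb_mono_some s q (q + 1) t r hmc).symm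
    | none =>
        rcases Nat.lt_or_ge q t with hlt | hge
        · rcases hC q hlt hc with hin | hsome
          · exact (mcb_stable_none s q t hmc (by omega) (hstk q hin)).symm
          · rw [hmc] at hsome; simp at hsome
        · rw [mcb_none_big s q (q + 1) (t + 1) (by omega)]
  · rw [if_neg hc, if_neg hc]

-- Complete preservation when no pop happens and the stack only possibly grows
lemma Complete_keep (s : List Char) (t : Nat) (stk stk' : List Nat)
    (hsub : ∀ q ∈ stk, q ∈ stk') (hC : Complete s t stk)
    (hne : s[t]! = '(' → t ∈ stk') : Complete s (t + 1) stk' := by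
  intro q hq hc
  rcases Nat.lt_or_ge q t with hlt | hge
  · rcases hC q hlt hc with hin | hsome
    · exact Or.inl (hsub q hin)
    · cases hmc : mcb s q (q + 1) t with
      | none => rw [hmc] at hsome; simp at hsome
      | some r => exact Or.inr (by rw [mcb_mono_some s q (q + 1) t r hmc]; rfl)
  · have : q = t := by omega
    subst this
    exact Or.inl (hne hc)

-- the big invariant-preservation run of bBuild
lemma bBuild_spec (s : List Char) :
    ∀ (N t : Nat) (m : List (Option Nat)) (stk : List Nat),
      s.length - t ≤ N → t ≤ s.length → StkInv s t stk 1 → MInv s t m → Complete s t stk →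
      MInv s s.length (bBuild s t m stk) := by
  intro N
  induction N with
  | zero =>
      intro t m stk hle htn _ hM _
      have : t = s.length := by omega
      subst this
      rw [bBuild.eq_def]; rw [dif_neg (by omega)]
      exact hM
  | succ n ih =>
      intro t m stk hle htn hS hM hC
      by_cases ht : t < s.length
      swap
      · have : t = s.length := by omega
        subst this
        rw [bBuild.eq_def]; rw [dif_neg (by omega)]
        exact hM
      rw [bBuild.eq_def]; rw [dif_pos ht]
      by_cases h1 : s[t]! = '('
      · rw [if_pos h1]
        have hd : pvDelta s[t]! = 1 := by unfold pvDelta; rw [if_pos h1]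
        have hstk : ∀ q ∈ stk, pvF s q (t + 1) ≠ 0 := by
          intro q hqmem
          obtain ⟨l, hl1, hl2, _, _⟩ := StkInv_mem s t stk 1 q hS hqmem
          rw [pvF_step s q t ht, hl2, hd]; omega
        refine ih (t + 1) m (t :: stk) (by omega) (by omega) ?_ ?_ ?_
        · refine ⟨h1, by omega, ?_, ?_, ?_⟩
          · rw [pvF_self]; norm_num
          · intro u hu1 hu2
            have : u = t + 1 := by omega
            rw [this, pvF_self]
          · exact StkInv_mono s t ht stk 1 2 (by rw [hd]; norm_num) (by omega) hS
        · exact MInv_push s t ht m stk hM hC hS h1 hstk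
        · exact Complete_keep s t stk (t :: stk) (fun q h => List.mem_cons_of_mem t h) hC
            (fun _ => List.mem_cons_self)
      · rw [if_neg h1]
        by_cases h2 : s[t]! = ')'
        · rw [if_pos h2]
          have hd : pvDelta s[t]! = -1 := by unfold pvDelta; rw [if_neg h1, if_pos h2]
          cases stk with
          | nil =>
              refine ih (t + 1) m [] (by omega) (by omega) trivial ?_ ?_
              · exact MInv_keep s t ht m [] hM hC hS (by rw [h2]; decide) (by simp)
              · exact Complete_keep s t [] [] (by simp) hC
                  (fun h => absurd h (by rw [h2]; decide))
          | cons q0 rest =>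
              obtain ⟨hq1, hq2, hq3, hq4, hq5⟩ := hS
              have hF0 : pvF s q0 (t + 1) = 0 := by
                rw [pvF_step s q0 t ht, hq3, hd]; norm_num
              have hold : mcb s q0 (q0 + 1) t = none := by
                apply mcb_none_of
                intro r hr1 hr2
                have := hq4 (r + 1) (by omega) (by omega)
                omega
              have hnew : mcb s q0 (q0 + 1) (t + 1) = some t := by
                rw [mcb_none_step s q0 (q0 + 1) t hold (by omega), if_pos hF0]
              obtain ⟨hlen, hm⟩ := hM
              refine ih (t + 1) (m.set q0 (some t)) rest (by omega) (by omega) ?_ ?_ ?_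
              · exact StkInv_mono s t ht rest 2 1 (by rw [hd]; norm_num) (by omega) hq5
              · refine ⟨by simp [hlen], fun q hq' => ?_⟩
                by_cases hqq : q = q0
                · subst hqq
                  rw [getD_eq, List.getElem?_set_self (by omega), if_pos hq1, hnew]
                  rfl
                · rw [getD_eq, List.getElem?_set_ne (fun h => hqq h.symm), ← getD_eq,
                    hm q hq']
                  by_cases hc : s[q]! = '('
                  · rw [if_pos hc, if_pos hc]
                    cases hmc : mcb s q (q + 1) t with
                    | some r => exact (mcb_mono_some s q (q + 1) t r hmc).symm
                    | none =>
                        rcases Nat.lt_or_ge q t with hlt | hge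
                        · rcases hC q hlt hc with hin | hsome
                          · rcases List.mem_cons.mp hin with h | h
                            · exact absurd h hqq
                            · obtain ⟨l, hl1, hl2, _, _⟩ := StkInv_mem s t rest 2 q hq5 h
                              refine (mcb_stable_none s q t hmc (by omega) ?_).symm
                              rw [pvF_step s q t ht, hl2, hd]; omega
                          · rw [hmc] at hsome; simp at hsome
                        · have : q = t ∨ t < q := by omega
                          rcases this with h | h
                          · subst h; rw [h2] at hc; exact absurd hc (by decide)
                          · rw [mcb_none_big s q (q + 1) (t + 1) (by omega)]
                  · rw [if_neg hc, if_neg hc]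
              · intro q hq hc
                rcases Nat.lt_or_ge q t with hlt | hge
                · rcases hC q hlt hc with hin | hsome
                  · rcases List.mem_cons.mp hin with h | h
                    · subst h; exact Or.inr (by rw [hnew]; rfl)
                    · exact Or.inl h
                  · cases hmc : mcb s q (q + 1) t with
                    | none => rw [hmc] at hsome; simp at hsome
                    | some r => exact Or.inr (by rw [mcb_mono_some s q (q + 1) t r hmc]; rfl)
                · have : q = t := by omega
                  subst this
                  rw [h2] at hc; exact absurd hc (by decide)
        · rw [if_neg h2]
          have hd : pvDelta s[t]! = 0 := by unfold pvDelta; rw [if_neg h1, if_neg h2]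
          have hstk : ∀ q ∈ stk, pvF s q (t + 1) ≠ 0 := by
            intro q hqmem
            obtain ⟨l, hl1, hl2, _, _⟩ := StkInv_mem s t stk 1 q hS hqmem
            rw [pvF_step s q t ht, hl2, hd]; omega
          refine ih (t + 1) m stk (by omega) (by omega) ?_ ?_ ?_
          · exact StkInv_mono s t ht stk 1 1 (by rw [hd]; norm_num) (by omega) hS
          · exact MInv_keep s t ht m stk hM hC hS h1 hstk
          · exact Complete_keep s t stk stk (fun q h => h) hC (fun h => absurd h h1)

lemma table_spec (s : List Char) (q : Nat) (hq : q < s.length) (hc : s[q]! = '(') :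
    (bMatchTable s).getD q none = mcb s q (q + 1) s.length := by
  unfold bMatchTable
  have h := bBuild_spec s s.length 0 (List.replicate s.length none) [] (by omega) (by omega) trivial
    ⟨by simp, fun q' hq' => by
      rw [getD_eq, List.getElem?_replicate, if_pos hq', mcb_none_big s q' (q' + 1) 0 (by omega)]
      split <;> rfl⟩
    (fun q' hq' _ => by omega)
  rw [(h.2) q hq, if_pos hc]

-- A's result of the '((' branch, phrased through the table
lemma main_eq (s : List Char) :
    ∀ N i acc, s.length - i ≤ N → aMain s i acc = bMain s (bMatchTable s) i acc := by
  intro N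
  induction N with
  | zero =>
      intro i acc h
      rw [aMain, bMain]
      rw [dif_neg (by omega), dif_neg (by omega)]
  | succ N ih =>
      intro i acc hN
      rcases Nat.lt_or_ge i s.length with hi | hi
      swap
      · rw [aMain, bMain]; rw [dif_neg (by omega), dif_neg (by omega)]
      rw [aMain, bMain]; rw [dif_pos hi, dif_pos hi]
      by_cases hb : i + 1 < s.length ∧ s[i]! = '(' ∧ s[i + 1]! = '('
      · rw [dif_pos hb]
        obtain ⟨hb1, hb2, hb3⟩ := hb
        have htab : (bMatchTable s).getD (i + 1) none = mcb s (i + 1) (i + 2) s.length :=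
          table_spec s (i + 1) hb1 hb3
        cases hmc : mcb s (i + 1) (i + 2) s.length with
        | none =>
            have hA : (aDepthLoop s (i + 2) 1).2 ≠ 0 :=
              dscan_none s (i + 1) (i + 2) 1 (by omega) (by omega)
                (by show (1:Int) = pvF s (i+1) (i+1+1); rw [pvF_self]) hmc
            rw [if_pos hA, dif_neg (by rw [htab, hmc]; simp)]
            exact ih (i + 1) (acc ++ [s[i]!]) (by omega)
        | some r =>
            have hA : aDepthLoop s (i + 2) 1 = (r + 1, 0) :=
              dscan_some s (i + 1) (i + 2) 1 r (by omega) (by omega)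
                (by show (1:Int) = pvF s (i+1) (i+1+1); rw [pvF_self]) hmc
            have hr : i + 2 ≤ r := (mcb_some_bounds s (i + 1) (i + 2) s.length r hmc).1
            rw [hA]
            rw [if_neg (by simp)]
            rw [dif_pos (by rw [htab, hmc]; exact ⟨hb2, hb1, hb3, rfl, by simp; omega⟩)]
            rw [htab, hmc]
            have hk : aSkipWs s (r + 1, 0).1 = bSkipWs s ((some r).getD 0 + 1) := by
              simp [skip_eq]
            rw [hk]
            set k := bSkipWs s ((some r).getD 0 + 1) with hkdef
            by_cases harrow : k + 1 < s.length ∧ s[k]! = '=' ∧ s[k + 1]! = '>'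
            · rw [if_pos harrow, if_pos harrow]
              have hkr : r + 1 ≤ k := by
                have := bSkipWs_ge s ((some r).getD 0 + 1); simpa using this
              have hjump := bSkipWs_ge s (k + 2)
              rw [skip_eq, hb2]
              exact ih (bSkipWs s (k + 2)) (acc ++ ['(']) (by omega)
            · rw [if_neg harrow, if_neg harrow]
              exact ih (i + 1) (acc ++ [s[i]!]) (by omega)
      · rw [dif_neg hb]
        have hb' : ¬(s[i]! = '(' ∧ i + 1 < s.length ∧ s[i + 1]! = '(' ∧
            ((bMatchTable s).getD (i + 1) none).isSome ∧
            i + 1 < ((bMatchTable s).getD (i + 1) none).getD 0) := by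
          intro ⟨h1, h2, h3, _⟩
          exact hb ⟨h2, h1, h3⟩
        rw [dif_neg hb']
        exact ih (i + 1) (acc ++ [s[i]!]) (by omega)

-- ===== VERDICT (by name: the statement is the Claim_ definition above) =====
theorem strip_antlr2_syntactic_predicates_spec : Claim_equal_strip_antlr2_syntactic_predicates := by
  intro text _
  unfold Spec_strip_antlr2_syntactic_predicates strip_antlr2_syntactic_predicates
    strip_antlr2_syntactic_predicates_alt
  rw [main_eq text.toList (text.toList.length - 0) 0 [] (by omega)]
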